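-- pv_equiv track=rewrite | github.com/hannemennah/superminion | includes.py | isBuy
-- ===== SOURCE A (Python) =====
-- def isBuy(priceArr = [], x = 0):
--     if(x <= 0):
--         return True
--     elif(priceArr[x] > priceArr[x-1]):
--         return True
--     elif(priceArr[x] < priceArr[x-1]):
--         return False
--     else:
--         return isBuy(priceArr, (x-1))
-- ===== SOURCE B (Python) =====
-- def isBuy(priceArr = [], x = 0):
--     while x > 0:
--         if priceArr[x] > priceArr[x-1]:
--             return True
--         elif priceArr[x] < priceArr[x-1]:
--             return False
--         x -= 1
--     return True
-- ===== Notes on version B (the rewrite author's own statement) =====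
-- stated objective: idiomatic
-- what changed: Replaces A's tail recursion with an explicit while loop doing the same backward scan, the formulation an experienced Python developer would write (and it avoids RecursionError on very long runs of equal prices).
import Mathlib
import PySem

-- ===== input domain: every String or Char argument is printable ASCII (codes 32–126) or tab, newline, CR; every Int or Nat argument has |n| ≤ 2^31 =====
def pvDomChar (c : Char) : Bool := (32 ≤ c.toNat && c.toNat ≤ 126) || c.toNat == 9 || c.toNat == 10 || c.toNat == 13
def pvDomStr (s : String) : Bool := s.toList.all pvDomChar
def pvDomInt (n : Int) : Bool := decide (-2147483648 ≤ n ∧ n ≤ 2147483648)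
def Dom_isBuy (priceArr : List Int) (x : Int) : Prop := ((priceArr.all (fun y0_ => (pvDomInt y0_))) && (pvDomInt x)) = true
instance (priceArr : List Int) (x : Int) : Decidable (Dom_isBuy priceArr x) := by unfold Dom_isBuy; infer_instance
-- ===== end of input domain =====

-- B: A's tail recursion rewritten as an explicit while loop (same backward scan); idiomatic, equal return values.

-- ===== PORT A =====
-- literal transliteration of A's recursion; pyGet? = none is Python's IndexError (excluded by Pre_)
def isBuy (priceArr : List Int) (x : Int) : Bool :=
  if x ≤ 0 then true
  else
    match PySem.List.pyGet? priceArr x, PySem.List.pyGet? priceArr (x - 1) with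
    | some a, some b =>
        if a > b then true
        else if a < b then false
        else isBuy priceArr (x - 1)
    | _, _ => false   -- IndexError in Python; outside Pre_
termination_by x.toNat
decreasing_by omega

-- ===== PORT B =====
-- the while loop of Source B: counter n = current value of x (x > 0 ⇔ n = m+1), decremented each iteration
def altScanLoop (priceArr : List Int) : Nat → Bool
  | 0 => true
  | Nat.succ m =>
      match PySem.List.pyGet? priceArr ((m + 1 : Nat) : Int) with
      | none => false   -- IndexError in Python; outside Pre_
      | some a =>
        match PySem.List.pyGet? priceArr ((m : Nat) : Int) with
        | none => false   -- IndexError in Python; outside Pre_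
        | some b =>
          if a > b then true
          else if a < b then false
          else altScanLoop priceArr m

def isBuy_alt (priceArr : List Int) (x : Int) : Bool :=
  altScanLoop priceArr x.toNat

-- ===== PRECONDITION & SPEC =====
-- Pre_ excludes exactly the inputs where the Python raises IndexError (x > 0 with x out of range).
def Pre_isBuy (priceArr : List Int) (x : Int) : Prop := x ≤ 0 ∨ x < priceArr.length
instance (priceArr : List Int) (x : Int) : Decidable (Pre_isBuy priceArr x) := by unfold Pre_isBuy; infer_instance
def pvWitness_isBuy : List Int × Int := ([3, 3, 5], 2)
def Spec_isBuy (priceArr : List Int) (x : Int) (out : Bool) : Prop := out = isBuy_alt priceArr x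
instance (priceArr : List Int) (x : Int) (out : Bool) : Decidable (Spec_isBuy priceArr x out) := by unfold Spec_isBuy; infer_instance

-- ===== CLAIM (what is proved, stated in full; the proofs are below) =====
def Claim_equal_isBuy : Prop := ∀ (priceArr : List Int) (x : Int), Dom_isBuy priceArr x → Pre_isBuy priceArr x → Spec_isBuy priceArr x (isBuy priceArr x)

-- ===== LEMMAS AND PROOFS =====
-- The two ports agree on every input (even outside Pre_, where both return false on the missing index).
theorem isBuy_eq_go (priceArr : List Int) (x : Int) : isBuy priceArr x = altScanLoop priceArr x.toNat := by
  generalize hn : x.toNat = n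
  induction n generalizing x with
  | zero =>
      have hx : x ≤ 0 := by omega
      simp [isBuy, hx, altScanLoop]
  | succ m ih =>
      have hx : ¬ x ≤ 0 := by omega
      have hx1 : ((m + 1 : Nat) : Int) = x := by omega
      have hx2 : ((m : Nat) : Int) = x - 1 := by omega
      have hm : (x - 1).toNat = m := by omega
      rw [isBuy]
      simp only [hx, if_false, altScanLoop, hx1, hx2]
      cases PySem.List.pyGet? priceArr x with
      | none => rfl
      | some a =>
        cases PySem.List.pyGet? priceArr (x - 1) with
        | none => rfl
        | some b =>
          by_cases h1 : a > b
          · simp [h1]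
          · by_cases h2 : a < b
            · simp [h1, h2]
            · simp [h1, h2, ih _ hm]

-- ===== VERDICT (by name: the statement is the Claim_ definition above) =====
theorem isBuy_spec : Claim_equal_isBuy := by
  intro priceArr x _ _
  unfold Spec_isBuy isBuy_alt
  exact isBuy_eq_go priceArr x
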